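-- pv_equiv track=rewrite | github.com/drizztSun/common_project | PythonLeetcode/leetcodeM/1577_NumberOfWaysWhereSquareOfNumberIsEqualProductOfTwoNumbers.py | doit_hastable
-- ===== SOURCE A (Python) =====
-- def doit_hastable(nums1: list, nums2: list) -> int:
--     def helper(A, B):
--         from collections import Counter
--         ans = 0
--         C = Counter([a*a for a in A])
--         D = Counter()
--         for b in B:
--             for k, v in D.items():
--                 if k*b in C:
--                     ans += v * C[k*b]
--             D[b] += 1
--         return ans
--
--     return helper(nums1, nums2) + helper(nums2, nums1)
-- ===== SOURCE B (Python) =====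
-- def doit_hastable(nums1: list, nums2: list) -> int:
--     def helper(A, B):
--         from collections import Counter
--         C = Counter(a * a for a in A)
--         cb = Counter(B)
--         rest = list(cb)
--         ans = 0
--         while rest:
--             k = rest.pop(0)
--             c = cb[k]
--             ans += C.get(k * k, 0) * (c * (c - 1) // 2)
--             ans += c * sum(C.get(k * k2, 0) * cb[k2] for k2 in rest)
--         return ans
--
--     return helper(nums1, nums2) + helper(nums2, nums1)
-- ===== Notes on version B (the rewrite author's own statement) =====
-- stated objective: alternative
-- what changed: Instead of streaming B's elements while growing an incremental prefix Counter D and scanning D.items per element, B builds the full Counter(B) once and sums over unordered pairs of its distinct values with combinatorial multiplicities (C(c,2) for equal values, c_i*c_j for distinct ones).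
import Mathlib
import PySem

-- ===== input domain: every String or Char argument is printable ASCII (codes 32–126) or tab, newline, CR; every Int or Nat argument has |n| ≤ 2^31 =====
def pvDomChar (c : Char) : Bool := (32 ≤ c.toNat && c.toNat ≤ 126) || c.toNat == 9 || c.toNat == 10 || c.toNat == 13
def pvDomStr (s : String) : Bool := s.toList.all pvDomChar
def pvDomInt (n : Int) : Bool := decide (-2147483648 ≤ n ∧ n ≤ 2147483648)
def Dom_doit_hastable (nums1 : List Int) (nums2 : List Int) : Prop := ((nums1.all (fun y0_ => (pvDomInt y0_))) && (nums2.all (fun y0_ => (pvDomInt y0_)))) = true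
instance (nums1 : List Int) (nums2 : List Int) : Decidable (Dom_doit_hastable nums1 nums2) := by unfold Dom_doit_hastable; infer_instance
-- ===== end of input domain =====

-- B replaces A's incremental prefix-Counter pair streaming by one full Counter(B) and a
-- combinatorial sum over unordered pairs of its distinct values (alternative decomposition, same result).


-- ===== PORT A =====
-- helper(A, B) of the Python: C = Counter(a*a for a in A); stream B growing Counter D,
-- scanning D.items for each b (D[b] += 1 is Dict.modify b 0 (· + 1)).
def pyHelperA (A B : List Int) : Int :=
  let C := PySem.Dict.counter (A.map (fun a => a * a))
  (B.foldl (fun (st : Int × PySem.Dict Int Int) b =>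
      (st.2.items.foldl (fun ans kv =>
          if C.contains (kv.1 * b) then ans + kv.2 * C.getD (kv.1 * b) 0 else ans) st.1,
       st.2.modify b 0 (· + 1)))
    (0, PySem.Dict.empty)).1

def doit_hastable (nums1 : List Int) (nums2 : List Int) : Int :=
  pyHelperA nums1 nums2 + pyHelperA nums2 nums1

-- ===== PORT B =====
-- the 'while rest: k = rest.pop(0); …' loop of Source B, step for step
def pyScanB (C cb : PySem.Dict Int Int) : List Int → Int → Int
  | [], ans => ans
  | k :: rest, ans =>
    pyScanB C cb rest
      (ans + C.getD (k * k) 0 * PySem.Int.floordiv (cb.getD k 0 * (cb.getD k 0 - 1)) 2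
           + cb.getD k 0 * (rest.map (fun k2 => C.getD (k * k2) 0 * cb.getD k2 0)).sum)

-- helper(A, B) of Source B: C = Counter(a*a for a in A); cb = Counter(B); scan distinct values
def pyHelperB (A B : List Int) : Int :=
  let C := PySem.Dict.counter (A.map (fun a => a * a))
  let cb := PySem.Dict.counter B
  pyScanB C cb cb.keys 0

def doit_hastable_alt (nums1 : List Int) (nums2 : List Int) : Int :=
  pyHelperB nums1 nums2 + pyHelperB nums2 nums1

-- ===== PRECONDITION & SPEC =====
def Spec_doit_hastable (nums1 : List Int) (nums2 : List Int) (out : Int) : Prop := out = doit_hastable_alt nums1 nums2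
instance (nums1 : List Int) (nums2 : List Int) (out : Int) : Decidable (Spec_doit_hastable nums1 nums2 out) := by unfold Spec_doit_hastable; infer_instance

-- ===== CLAIM (what is proved, stated in full; the proofs are below) =====
def Claim_equal_doit_hastable : Prop := ∀ (nums1 : List Int) (nums2 : List Int), Dom_doit_hastable nums1 nums2 → Spec_doit_hastable nums1 nums2 (doit_hastable nums1 nums2)

-- ===== LEMMAS AND PROOFS =====

-- the common mathematical value: sum of f (B i * B j) over index pairs i < j, grouped by i
def pairP (f : Int → Int) : List Int → Int
  | [] => 0
  | x :: xs => (xs.map (fun y => f (x * y))).sum + pairP f xs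

-- B-side value as a function of the distinct-value list S and the multiplicity function cnt
def pyT (c : Int) : Int := PySem.Int.floordiv (c * (c - 1)) 2

def pairFB (f cnt : Int → Int) : List Int → Int
  | [] => 0
  | k :: S => f (k * k) * pyT (cnt k) + cnt k * (S.map (fun k2 => f (k * k2) * cnt k2)).sum + pairFB f cnt S

lemma pyT_succ (c : Int) : pyT (c + 1) = pyT c + c := by
  unfold pyT
  rw [PySem.Int.floordiv_eq_ediv_of_pos (by norm_num), PySem.Int.floordiv_eq_ediv_of_pos (by norm_num)]
  have h : (c + 1) * (c + 1 - 1) = c * (c - 1) + c * 2 := by ring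
  rw [h, Int.add_mul_ediv_right _ _ (by norm_num)]

lemma sum_ite_mem (S : List Int) (x : Int) (g : Int → Int) (hS : S.Nodup) :
    (S.map (fun k => if k = x then g k else 0)).sum = if x ∈ S then g x else 0 := by
  induction S with
  | nil => simp
  | cons a S ih =>
    have hS' := hS
    simp only [List.nodup_cons] at hS'
    simp only [List.map_cons, List.sum_cons, ih hS'.2, List.mem_cons]
    by_cases hax : a = x
    · subst hax
      simp [hS'.1]
    · simp [hax, Ne.symm hax]

lemma sum_count_mul (g : Int → Int) (p : List Int) : ∀ (S : List Int), S.Nodup → (∀ x ∈ p, x ∈ S) →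
    (S.map (fun k => (p.count k : Int) * g k)).sum = (p.map g).sum := by
  induction p with
  | nil => intro S _ _; simp
  | cons x p ih =>
    intro S hS hsub
    have hx : x ∈ S := hsub x (by simp)
    have hstep : ∀ k, ((x :: p).count k : Int) * g k
        = (p.count k : Int) * g k + (if k = x then g k else 0) := by
      intro k
      by_cases hk : k = x
      · subst hk; simp; ring
      · have hk' : ¬ x = k := fun h => hk h.symm
        simp [hk, hk']
    calc (S.map (fun k => ((x :: p).count k : Int) * g k)).sum
        = (S.map (fun k => (p.count k : Int) * g k + (if k = x then g k else 0))).sum := by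
          exact congrArg _ (List.map_congr_left (fun k _ => hstep k))
      _ = (S.map (fun k => (p.count k : Int) * g k)).sum
          + (S.map (fun k => if k = x then g k else 0)).sum := by
          rw [← List.sum_map_add]
      _ = (p.map g).sum + g x := by
          rw [ih S hS (fun y hy => hsub y (by simp [hy])), sum_ite_mem S x g hS, if_pos hx]
      _ = ((x :: p).map g).sum := by simp [List.map_cons]; ring

-- A-side: C built as a counter looks up 0 outside its keys
lemma counter_getD_of_not_contains (L : List Int) (x : Int)
    (h : (PySem.Dict.counter L).contains x = false) : (PySem.Dict.counter L).getD x 0 = 0 := by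
  rw [PySem.Dict.getD_counter]
  rw [PySem.Dict.contains_counter] at h
  simp at h
  simp [List.count_eq_zero_of_not_mem h]

-- the inner 'for k, v in D.items()' scan over D = Counter(p) sums f (x * b) over the prefix p
lemma inner_scan_eq (C : PySem.Dict Int Int)
    (hC : ∀ x, C.contains x = false → C.getD x 0 = 0) (p : List Int) (b : Int) (ans : Int) :
    ((PySem.Dict.counter p).items.foldl (fun a (kv : Int × Int) =>
        if C.contains (kv.1 * b) then a + kv.2 * C.getD (kv.1 * b) 0 else a) ans)
      = ans + (p.map (fun x => C.getD (x * b) 0)).sum := by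
  have hfun : (fun (a : Int) (kv : Int × Int) =>
      if C.contains (kv.1 * b) then a + kv.2 * C.getD (kv.1 * b) 0 else a)
      = fun a kv => a + kv.2 * C.getD (kv.1 * b) 0 := by
    funext a kv
    by_cases h : C.contains (kv.1 * b)
    · simp [h]
    · simp only [Bool.not_eq_true] at h
      simp [h, hC _ h]
  rw [hfun, PySem.List.foldl_add, PySem.Dict.items_counter, List.map_map]
  congr 1
  rw [show ((fun kv : Int × Int => kv.2 * C.getD (kv.1 * b) 0) ∘ fun k => (k, (p.count k : Int)))
        = fun k => (p.count k : Int) * C.getD (k * b) 0 from rfl]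
  exact sum_count_mul (fun k => C.getD (k * b) 0) p (PySem.Set.ofList p) (PySem.Set.nodup_ofList p)
        (fun x hx => (PySem.Set.mem_ofList p x).2 hx)

-- A's outer fold, generalized over the already-consumed prefix p
lemma A_loop (C : PySem.Dict Int Int)
    (hC : ∀ x, C.contains x = false → C.getD x 0 = 0) :
    ∀ (B p : List Int) (ans : Int),
    (B.foldl (fun (st : Int × PySem.Dict Int Int) b =>
        (st.2.items.foldl (fun a kv =>
            if C.contains (kv.1 * b) then a + kv.2 * C.getD (kv.1 * b) 0 else a) st.1,
         st.2.modify b 0 (· + 1)))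
      (ans, PySem.Dict.counter p)).1
    = ans + (p.map (fun x => (B.map (fun b => C.getD (x * b) 0)).sum)).sum
        + pairP (fun x => C.getD x 0) B := by
  intro B
  induction B with
  | nil => intro p ans; simp [pairP]
  | cons b B ih =>
    intro p ans
    rw [List.foldl_cons]
    have hD : (PySem.Dict.counter p).modify b 0 (· + 1) = PySem.Dict.counter (p ++ [b]) := by
      rw [PySem.Dict.counter_append_singleton]
    rw [inner_scan_eq C hC p b ans, hD, ih (p ++ [b]) _]
    simp only [pairP, List.map_append, List.sum_append, List.map_cons, List.sum_cons,
      List.map_nil, List.sum_nil, add_zero]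
    have hcomm : (B.map (fun y => C.getD (b * y) 0)).sum = (B.map (fun y => C.getD (y * b) 0)).sum := by
      congr 1
      exact List.map_congr_left (fun y _ => by rw [mul_comm])
    rw [PySem.List.sum_map_add_int, hcomm]
    ring

-- B-side: the scan with accumulator computes pairFB
lemma scanB_eq (C cb : PySem.Dict Int Int) : ∀ (l : List Int) (ans : Int),
    pyScanB C cb l ans = ans + pairFB (fun x => C.getD x 0) (fun k => cb.getD k 0) l := by
  intro l
  induction l with
  | nil => intro ans; simp [pyScanB, pairFB]
  | cons k rest ih =>
    intro ans
    rw [pyScanB, ih, pairFB]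
    unfold pyT
    ring

lemma pairFB_congr (f cnt cnt' : Int → Int) : ∀ (S : List Int), (∀ k ∈ S, cnt k = cnt' k) →
    pairFB f cnt S = pairFB f cnt' S := by
  intro S
  induction S with
  | nil => intro _; rfl
  | cons k S ih =>
    intro h
    have hmap : S.map (fun k2 => f (k * k2) * cnt k2) = S.map (fun k2 => f (k * k2) * cnt' k2) :=
      List.map_congr_left (fun y hy => by rw [h y (by simp [hy])])
    rw [pairFB, pairFB, ih (fun y hy => h y (by simp [hy])), h k (by simp), hmap]

lemma pairFB_perm (f cnt : Int → Int) {S S' : List Int} (h : S.Perm S') :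
    pairFB f cnt S = pairFB f cnt S' := by
  induction h with
  | nil => rfl
  | cons x h ih =>
    rw [pairFB, pairFB, ih, List.Perm.sum_eq (h.map (fun k2 => f (x * k2) * cnt k2))]
  | swap x y S =>
    simp only [pairFB, List.map_cons, List.sum_cons]
    rw [show f (x * y) = f (y * x) from by rw [mul_comm]]
    ring
  | trans _ _ ih1 ih2 => rw [ih1, ih2]

-- the heart of the equivalence: the combinatorial pair sum over distinct values equals pairP
lemma FB_main (f : Int → Int) : ∀ (B : List Int),
    pairFB f (fun k => (B.count k : Int)) (PySem.Set.ofList B) = pairP f B := by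
  intro B
  induction B with
  | nil => simp [pairP]; rfl
  | cons b rest ih =>
    set S : List Int := (PySem.Set.ofList rest).erase b with hSdef
    have hnd : (PySem.Set.ofList rest).Nodup := PySem.Set.nodup_ofList rest
    have hSnd : S.Nodup := hnd.erase b
    have hbS : b ∉ S := List.Nodup.not_mem_erase hnd
    have hmemS : ∀ x, x ∈ S ↔ x ≠ b ∧ x ∈ rest := by
      intro x
      rw [hSdef, List.Nodup.mem_erase_iff hnd, PySem.Set.mem_ofList rest x]
    have hperm1 : (PySem.Set.ofList (b :: rest)).Perm (b :: S) := by
      rw [List.perm_ext_iff_of_nodup (PySem.Set.nodup_ofList _) (by simp [List.nodup_cons, hbS, hSnd])]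
      intro x
      rw [PySem.Set.mem_ofList _ x, List.mem_cons, List.mem_cons, hmemS x]
      by_cases hx : x = b <;> simp [hx]
    have hcnt' : ∀ k ∈ S, ((b :: rest).count k : Int) = (rest.count k : Int) := by
      intro k hk
      have h1 : k ≠ b := ((hmemS k).1 hk).1
      have h2 : ¬ b = k := fun h => h1 h.symm
      simp [h2]
    -- left side, reshaped through the permutation
    rw [pairFB_perm f _ hperm1, pairFB]
    rw [pairFB_congr _ _ (fun k => (rest.count k : Int)) S hcnt']
    have hheadcnt : ((b :: rest).count b : Int) = (rest.count b : Int) + 1 := by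
      simp
    have hmapS : (S.map (fun k2 => f (b * k2) * ((b :: rest).count k2 : Int)))
        = S.map (fun k2 => f (b * k2) * (rest.count k2 : Int)) :=
      List.map_congr_left (fun k hk => by rw [hcnt' k hk])
    rw [hheadcnt, hmapS]
    -- right side
    rw [pairP, ← ih]
    -- the new cross terms: sum over rest of f (b * y)
    have hcover : ∀ x ∈ rest, x ∈ b :: S := by
      intro x hx
      by_cases hxb : x = b
      · simp [hxb]
      · exact List.mem_cons_of_mem _ ((hmemS x).2 ⟨hxb, hx⟩)
    have hsum : (rest.map (fun y => f (b * y))).sum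
        = (rest.count b : Int) * f (b * b)
          + (S.map (fun k => (rest.count k : Int) * f (b * k))).sum := by
      rw [← sum_count_mul (fun y => f (b * y)) rest (b :: S)
            (by simp [List.nodup_cons, hbS, hSnd]) hcover]
      simp
    -- relate pairFB f cnt (ofList rest) to pairFB f cnt S
    by_cases hb : b ∈ rest
    · have hbmem : b ∈ PySem.Set.ofList rest := (PySem.Set.mem_ofList rest b).2 hb
      have hperm2 : (PySem.Set.ofList rest).Perm (b :: S) := List.perm_cons_erase hbmem
      rw [pairFB_perm f _ hperm2, pairFB]
      rw [hsum]
      rw [pyT_succ]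
      have hflip : (S.map (fun k2 => f (b * k2) * (rest.count k2 : Int)))
          = S.map (fun k => (rest.count k : Int) * f (b * k)) :=
        List.map_congr_left (fun k _ => by ring)
      rw [hflip]
      ring
    · have hc0 : (rest.count b : Int) = 0 := by
        simp [List.count_eq_zero_of_not_mem hb]
      have hS0 : S = PySem.Set.ofList rest := by
        rw [hSdef, List.erase_of_not_mem (fun h => hb ((PySem.Set.mem_ofList rest b).1 h))]
      rw [← hS0, hsum, hc0]
      have hT1 : pyT (0 + 1) = 0 := by decide
      rw [hT1]
      have hflip : (S.map (fun k2 => f (b * k2) * (rest.count k2 : Int)))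
          = S.map (fun k => (rest.count k : Int) * f (b * k)) :=
        List.map_congr_left (fun k _ => by ring)
      rw [hflip]
      ring

-- the two helpers agree
lemma helper_eq (A B : List Int) : pyHelperA A B = pyHelperB A B := by
  unfold pyHelperA pyHelperB
  set C := PySem.Dict.counter (A.map (fun a => a * a)) with hCdef
  have hC : ∀ x, C.contains x = false → C.getD x 0 = 0 := fun x h =>
    counter_getD_of_not_contains _ x h
  have hA := A_loop C hC B [] 0
  simp only [List.map_nil, List.sum_nil] at hA
  have hempty : (PySem.Dict.empty : PySem.Dict Int Int) = PySem.Dict.counter ([] : List Int) := rfl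
  rw [hempty, hA]
  have hkeys : (PySem.Dict.counter B).keys = PySem.Set.ofList B := PySem.Dict.keys_counter B
  rw [scanB_eq, hkeys]
  have hcntfun : (fun k => (PySem.Dict.counter B).getD k 0) = fun k => (B.count k : Int) :=
    funext (fun k => PySem.Dict.getD_counter B k)
  rw [hcntfun, FB_main]
  ring

-- ===== VERDICT (by name: the statement is the Claim_ definition above) =====
theorem doit_hastable_spec : Claim_equal_doit_hastable := by
  intro nums1 nums2 _
  unfold Spec_doit_hastable doit_hastable doit_hastable_alt
  rw [helper_eq nums1 nums2, helper_eq nums2 nums1]
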